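-- pv_equiv track=rewrite | github.com/quad99technologies-beep/Scappers | scrapy_project/pharma/spiders/india_details.py | _strip_dosage_suffix
-- ===== SOURCE A (Python) =====
-- from typing import Any, Dict, List, Optional, Tuple
--
-- _DOSAGE_SUFFIX_PHRASES = [
--     ("EYE", "DROPS"),
--     ("EAR", "DROPS"),
--     ("NASAL", "SPRAY"),
--     ("ORAL", "SOLUTION"),
--     ("ORAL", "SUSPENSION"),
--     ("ORAL", "DROPS"),
--     ("INTRAVENOUS", "INJECTION"),
--     ("IV", "INJECTION"),
--     ("IM", "INJECTION"),
--     ("INJECTION",),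
--     ("TABLET", "SR"),
--     ("TABLET", "ER"),
--     ("TABLET", "XR"),
--     ("TABLET", "CR"),
--     ("TABLET", "DR"),
--     ("TABLET",),
--     ("CAPSULE", "SR"),
--     ("CAPSULE", "ER"),
--     ("CAPSULE", "XR"),
--     ("CAPSULE", "CR"),
--     ("CAPSULE", "DR"),
--     ("CAPSULE",),
--     ("CREAM",),
--     ("GEL",),
--     ("OINTMENT",),
--     ("LOTION",),
--     ("SYRUP",),
--     ("SUSPENSION",),
--     ("SOLUTION",),
--     ("DROPS",),
--     ("SPRAY",),
--     ("SHAMPOO",),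
--     ("SOAP",),
--     ("POWDER",),
--     ("GRANULES",),
--     ("SACHET",),
--     ("TUBE",),
--     ("PATCH",),
--     ("AEROSOL",),
--     ("INHALER",),
--     ("INHALATION",),
--     ("NEBULISER",),
--     ("NEBULIZER",),
--     ("MOUTHWASH",),
--     ("RINSE",),
-- ]
--
-- def _strip_dosage_suffix(s: str) -> Optional[str]:
--     """
--     Heuristic: strip trailing dosage-form phrases like 'TABLET', 'INJECTION', 'EYE DROPS'.
--     Keeps ingredient names while removing form words that NPPA formulation list often omits.
--     """
--     toks = (s or "").split()
--     if len(toks) < 2: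
--         return None
--     for phrase in sorted(_DOSAGE_SUFFIX_PHRASES, key=len, reverse=True):
--         n = len(phrase)
--         if len(toks) >= n and tuple(toks[-n:]) == phrase:
--             out = " ".join(toks[:-n]).strip()
--             if out and out != s and len(out.split()) >= 2:
--                 return out
--     return None
-- ===== SOURCE B (Python) =====
-- from typing import Optional
--
-- _DOSAGE_SUFFIX_PHRASES = [
--     ("EYE", "DROPS"),
--     ("EAR", "DROPS"),
--     ("NASAL", "SPRAY"),
--     ("ORAL", "SOLUTION"),
--     ("ORAL", "SUSPENSION"),
--     ("ORAL", "DROPS"),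
--     ("INTRAVENOUS", "INJECTION"),
--     ("IV", "INJECTION"),
--     ("IM", "INJECTION"),
--     ("INJECTION",),
--     ("TABLET", "SR"),
--     ("TABLET", "ER"),
--     ("TABLET", "XR"),
--     ("TABLET", "CR"),
--     ("TABLET", "DR"),
--     ("TABLET",),
--     ("CAPSULE", "SR"),
--     ("CAPSULE", "ER"),
--     ("CAPSULE", "XR"),
--     ("CAPSULE", "CR"),
--     ("CAPSULE", "DR"),
--     ("CAPSULE",),
--     ("CREAM",),
--     ("GEL",),
--     ("OINTMENT",),
--     ("LOTION",),
--     ("SYRUP",),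
--     ("SUSPENSION",),
--     ("SOLUTION",),
--     ("DROPS",),
--     ("SPRAY",),
--     ("SHAMPOO",),
--     ("SOAP",),
--     ("POWDER",),
--     ("GRANULES",),
--     ("SACHET",),
--     ("TUBE",),
--     ("PATCH",),
--     ("AEROSOL",),
--     ("INHALER",),
--     ("INHALATION",),
--     ("NEBULISER",),
--     ("NEBULIZER",),
--     ("MOUTHWASH",),
--     ("RINSE",),
-- ]
--
--
-- def _build_trie(phrases):
--     """Trie over the REVERSED phrases; a node with key '' accepts."""
--     root = {}
--     for phrase in phrases:
--         node = root
--         for word in reversed(phrase):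
--             node = node.setdefault(word, {})
--         node[""] = {}
--     return root
--
--
-- _SUFFIX_TRIE = _build_trie(_DOSAGE_SUFFIX_PHRASES)
--
--
-- def _strip_dosage_suffix(s: str) -> Optional[str]:
--     """Single backward walk of the tokens down a reversed-phrase trie collects
--     every matching suffix length; then the lengths are tried longest-first."""
--     toks = (s or "").split()
--     if len(toks) < 2:
--         return None
--     depths = []
--     node = _SUFFIX_TRIE
--     for depth, tok in enumerate(reversed(toks), start=1):
--         node = node.get(tok)
--         if node is None:
--             break
--         if "" in node:
--             depths.append(depth)
--     for n in reversed(depths):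
--         out = " ".join(toks[:-n]).strip()
--         if out and out != s and len(out.split()) >= 2:
--             return out
--     return None
-- ===== Notes on version B (the rewrite author's own statement) =====
-- stated objective: alternative
-- what changed: B builds a reversed-phrase trie once at module load and does a single backward walk over the tokens collecting every matching suffix length, then tries those lengths longest-first, instead of A's per-call length-sorting of the 45-phrase list and linear scan with per-phrase suffix comparison.
import Mathlib
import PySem

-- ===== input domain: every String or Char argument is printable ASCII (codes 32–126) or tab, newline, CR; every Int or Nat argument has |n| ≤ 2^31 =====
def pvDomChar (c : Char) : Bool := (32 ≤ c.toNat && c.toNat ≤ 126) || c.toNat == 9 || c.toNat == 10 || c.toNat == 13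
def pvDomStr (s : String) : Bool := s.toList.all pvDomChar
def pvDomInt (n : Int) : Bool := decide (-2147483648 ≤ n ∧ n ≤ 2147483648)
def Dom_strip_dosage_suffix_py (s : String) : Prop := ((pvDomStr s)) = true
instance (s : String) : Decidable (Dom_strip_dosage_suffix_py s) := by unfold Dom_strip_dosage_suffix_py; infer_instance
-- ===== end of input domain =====

-- B replaces A's per-call sort-and-scan of the 45-phrase table by one backward walk of the
-- tokens down a reversed-phrase trie that collects the matching suffix lengths, tried
-- longest-first; objective: alternative algorithm/data structure.

-- ===== PORT A =====
-- _DOSAGE_SUFFIX_PHRASES: tuples of words, ported as lists of strings (original order).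
def pvPhrases : List (List String) :=
  [["EYE", "DROPS"], ["EAR", "DROPS"], ["NASAL", "SPRAY"], ["ORAL", "SOLUTION"],
   ["ORAL", "SUSPENSION"], ["ORAL", "DROPS"], ["INTRAVENOUS", "INJECTION"],
   ["IV", "INJECTION"], ["IM", "INJECTION"], ["INJECTION"], ["TABLET", "SR"],
   ["TABLET", "ER"], ["TABLET", "XR"], ["TABLET", "CR"], ["TABLET", "DR"],
   ["TABLET"], ["CAPSULE", "SR"], ["CAPSULE", "ER"], ["CAPSULE", "XR"],
   ["CAPSULE", "CR"], ["CAPSULE", "DR"], ["CAPSULE"], ["CREAM"], ["GEL"],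
   ["OINTMENT"], ["LOTION"], ["SYRUP"], ["SUSPENSION"], ["SOLUTION"], ["DROPS"],
   ["SPRAY"], ["SHAMPOO"], ["SOAP"], ["POWDER"], ["GRANULES"], ["SACHET"],
   ["TUBE"], ["PATCH"], ["AEROSOL"], ["INHALER"], ["INHALATION"], ["NEBULISER"],
   ["NEBULIZER"], ["MOUTHWASH"], ["RINSE"]]

-- the 'for phrase in sorted(...)' loop, one step per phrase, in order
def pvTryA (s : String) (toks : List String) : List (List String) → Option String
  | [] => none
  | p :: rest =>
    let n := p.length
    if toks.length ≥ n ∧ PySem.List.slice toks (some (-(n : Int))) none = p then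
      let out := PySem.Str.strip (PySem.Str.join " " (PySem.List.slice toks none (some (-(n : Int)))))
      if out ≠ "" ∧ out ≠ s ∧ 2 ≤ (PySem.Str.split₀ out).length then some out
      else pvTryA s toks rest
    else pvTryA s toks rest

def strip_dosage_suffix_py (s : String) : Option String :=
  let toks := PySem.Str.split₀ s   -- (s or "").split(): for a str argument, (s or "") ≡ s ("" splits to [])
  if toks.length < 2 then none
  else pvTryA s toks (PySem.List.sorted pvPhrases (fun p => (p.length : Int)) true)

-- ===== PORT B =====
-- Source B's nested-dict trie, as a mutual inductive (a child list may not nest the type in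
-- List). Python marks acceptance with key "" → the Bool flag here; the walked tokens come
-- from .split() and are never "", so lookups of real tokens agree with the Python dict.
mutual
inductive PvTrie : Type
  | node : Bool → PvTrieCs → PvTrie
inductive PvTrieCs : Type
  | nil : PvTrieCs
  | cons : String → PvTrie → PvTrieCs → PvTrieCs
end

-- dict .get on the children (first match, Python dicts have unique keys)
def pvCsGet : PvTrieCs → String → Option PvTrie
  | .nil, _ => none
  | .cons w t cs, x => if x == w then some t else pvCsGet cs x

def pvTrieGet : PvTrie → String → Option PvTrie
  | .node _ cs, x => pvCsGet cs x

def pvTrieEnd : PvTrie → Bool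
  | .node e _ => e

-- overwrite-or-append a child, as dict assignment does
def pvCsSet : PvTrieCs → String → PvTrie → PvTrieCs
  | .nil, w, t => .cons w t .nil
  | .cons w' t' cs, w, t => if w == w' then .cons w' t cs else .cons w' t' (pvCsSet cs w t)

-- the inner loop of _build_trie: node.setdefault(word, {}) down the word list, then node[""] = {}
def pvTrieInsert : PvTrie → List String → PvTrie
  | .node _ cs, [] => .node true cs
  | .node e cs, w :: ws =>
    let child := (pvCsGet cs w).getD (.node false .nil)
    .node e (pvCsSet cs w (pvTrieInsert child ws))

-- _SUFFIX_TRIE = _build_trie(_DOSAGE_SUFFIX_PHRASES)  (same module-level table as Source A)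
def pvSuffixTrie : PvTrie := pvPhrases.foldl (fun t p => pvTrieInsert t p.reverse) (.node false .nil)

-- the 'for depth, tok in enumerate(reversed(toks), start=1)' loop with its break
def pvWalkB : PvTrie → List String → Nat → List Nat → List Nat
  | _, [], _, acc => acc
  | nd, tok :: rest, depth, acc =>
    match pvTrieGet nd tok with
    | none => acc
    | some nd' => pvWalkB nd' rest (depth + 1) (if pvTrieEnd nd' then acc ++ [depth + 1] else acc)

-- the 'for n in reversed(depths)' loop
def pvTryB (s : String) (toks : List String) : List Nat → Option String
  | [] => none
  | n :: rest =>
    let out := PySem.Str.strip (PySem.Str.join " " (PySem.List.slice toks none (some (-(n : Int)))))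
    if out ≠ "" ∧ out ≠ s ∧ 2 ≤ (PySem.Str.split₀ out).length then some out
    else pvTryB s toks rest

def strip_dosage_suffix_py_alt (s : String) : Option String :=
  let toks := PySem.Str.split₀ s   -- (s or "").split(), as in port A
  if toks.length < 2 then none
  else
    let depths := pvWalkB pvSuffixTrie toks.reverse 0 []
    pvTryB s toks depths.reverse

-- ===== PRECONDITION & SPEC =====
def Spec_strip_dosage_suffix_py (s : String) (out : Option String) : Prop := out = strip_dosage_suffix_py_alt s
instance (s : String) (out : Option String) : Decidable (Spec_strip_dosage_suffix_py s out) := by unfold Spec_strip_dosage_suffix_py; infer_instance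

-- ===== CLAIM (what is proved, stated in full; the proofs are below) =====
def Claim_equal_strip_dosage_suffix_py : Prop := ∀ (s : String), Dom_strip_dosage_suffix_py s → Spec_strip_dosage_suffix_py s (strip_dosage_suffix_py s)

-- ===== LEMMAS AND PROOFS =====

-- the sorted phrase list: the 2-word phrases (original order) then the 1-word ones
def pvTwoL : List (List String) :=
  [["EYE", "DROPS"], ["EAR", "DROPS"], ["NASAL", "SPRAY"], ["ORAL", "SOLUTION"],
   ["ORAL", "SUSPENSION"], ["ORAL", "DROPS"], ["INTRAVENOUS", "INJECTION"],
   ["IV", "INJECTION"], ["IM", "INJECTION"], ["TABLET", "SR"], ["TABLET", "ER"],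
   ["TABLET", "XR"], ["TABLET", "CR"], ["TABLET", "DR"], ["CAPSULE", "SR"],
   ["CAPSULE", "ER"], ["CAPSULE", "XR"], ["CAPSULE", "CR"], ["CAPSULE", "DR"]]

def pvOneL : List (List String) :=
  [["INJECTION"], ["TABLET"], ["CAPSULE"], ["CREAM"], ["GEL"], ["OINTMENT"],
   ["LOTION"], ["SYRUP"], ["SUSPENSION"], ["SOLUTION"], ["DROPS"], ["SPRAY"],
   ["SHAMPOO"], ["SOAP"], ["POWDER"], ["GRANULES"], ["SACHET"], ["TUBE"],
   ["PATCH"], ["AEROSOL"], ["INHALER"], ["INHALATION"], ["NEBULISER"],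
   ["NEBULIZER"], ["MOUTHWASH"], ["RINSE"]]

lemma pvSorted_eq :
    PySem.List.sorted pvPhrases (fun p => (p.length : Int)) true = pvTwoL ++ pvOneL := by
  decide

lemma pvTryA_append (s : String) (toks : List String) (l₁ l₂ : List (List String)) :
    pvTryA s toks (l₁ ++ l₂) = (pvTryA s toks l₁).or (pvTryA s toks l₂) := by
  induction l₁ with
  | nil => simp [pvTryA]
  | cons p rest ih =>
    simp only [List.cons_append, pvTryA]
    split_ifs with h1 h2 <;> simp [ih]

lemma pvTryA_uniform (s : String) (toks : List String) (k : Nat)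
    (l : List (List String)) (hl : ∀ p ∈ l, p.length = k) (hk : k ≤ toks.length) :
    pvTryA s toks l =
      if PySem.List.slice toks (some (-(k : Int))) none ∈ l then
        (if PySem.Str.strip (PySem.Str.join " " (PySem.List.slice toks none (some (-(k : Int))))) ≠ "" ∧
            PySem.Str.strip (PySem.Str.join " " (PySem.List.slice toks none (some (-(k : Int))))) ≠ s ∧
            2 ≤ (PySem.Str.split₀ (PySem.Str.strip (PySem.Str.join " " (PySem.List.slice toks none (some (-(k : Int))))))).length
         then some (PySem.Str.strip (PySem.Str.join " " (PySem.List.slice toks none (some (-(k : Int))))))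
         else none)
      else none := by
  induction l with
  | nil => simp [pvTryA]
  | cons p rest ih =>
    have hp : p.length = k := hl p (List.mem_cons_self)
    have ih' := ih (fun q hq => hl q (List.mem_cons_of_mem _ hq))
    simp only [pvTryA, hp]
    by_cases hm : PySem.List.slice toks (some (-(k : Int))) none = p
    · have hmem : PySem.List.slice toks (some (-(k : Int))) none ∈ p :: rest := by
        simp [hm]
      rw [if_pos (show toks.length ≥ k ∧ PySem.List.slice toks (some (-(k : Int))) none = p from ⟨hk, hm⟩),
          if_pos hmem]
      by_cases hv : PySem.Str.strip (PySem.Str.join " " (PySem.List.slice toks none (some (-(k : Int))))) ≠ "" ∧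
          PySem.Str.strip (PySem.Str.join " " (PySem.List.slice toks none (some (-(k : Int))))) ≠ s ∧
          2 ≤ (PySem.Str.split₀ (PySem.Str.strip (PySem.Str.join " " (PySem.List.slice toks none (some (-(k : Int))))))).length
      · rw [if_pos hv, if_pos hv]
      · rw [if_neg hv, if_neg hv, ih']
        split_ifs <;> rfl
    · have hg : ¬(toks.length ≥ k ∧ PySem.List.slice toks (some (-(k : Int))) none = p) := by
        intro hx; exact hm hx.2
      rw [if_neg hg, ih']
      have hmm : (PySem.List.slice toks (some (-(k : Int))) none ∈ p :: rest) ↔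
             (PySem.List.slice toks (some (-(k : Int))) none ∈ rest) := by
        simp [List.mem_cons, hm]
      simp only [hmm]

lemma pvSlice_drop (toks : List String) (k : Nat) (hk : 1 ≤ k) (h : k ≤ toks.length) :
    PySem.List.slice toks (some (-(k : Int))) none = toks.drop (toks.length - k) := by
  have h1 : PySem.List.clampIdx toks.length (-(k : Int)) = toks.length - k := by
    simp only [PySem.List.clampIdx]
    rw [if_pos (by omega), if_neg (by omega)]
    omega
  simp only [PySem.List.slice, h1]
  rw [List.take_of_length_le]
  simp

-- literal value of the built trie (checked by the kernel)
def pvTrieLit : PvTrie :=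
  (.node false (.cons "DROPS" (.node true (.cons "EYE" (.node true .nil) (.cons "EAR" (.node true .nil) (.cons "ORAL" (.node true .nil) .nil)))) (.cons "SPRAY" (.node true (.cons "NASAL" (.node true .nil) .nil)) (.cons "SOLUTION" (.node true (.cons "ORAL" (.node true .nil) .nil)) (.cons "SUSPENSION" (.node true (.cons "ORAL" (.node true .nil) .nil)) (.cons "INJECTION" (.node true (.cons "INTRAVENOUS" (.node true .nil) (.cons "IV" (.node true .nil) (.cons "IM" (.node true .nil) .nil)))) (.cons "SR" (.node false (.cons "TABLET" (.node true .nil) (.cons "CAPSULE" (.node true .nil) .nil))) (.cons "ER" (.node false (.cons "TABLET" (.node true .nil) (.cons "CAPSULE" (.node true .nil) .nil))) (.cons "XR" (.node false (.cons "TABLET" (.node true .nil) (.cons "CAPSULE" (.node true .nil) .nil))) (.cons "CR" (.node false (.cons "TABLET" (.node true .nil) (.cons "CAPSULE" (.node true .nil) .nil))) (.cons "DR" (.node false (.cons "TABLET" (.node true .nil) (.cons "CAPSULE" (.node true .nil) .nil))) (.cons "TABLET" (.node true .nil) (.cons "CAPSULE" (.node true .nil) (.cons "CREAM" (.node true .nil)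 (.cons "GEL" (.node true .nil) (.cons "OINTMENT" (.node true .nil) (.cons "LOTION" (.node true .nil) (.cons "SYRUP" (.node true .nil) (.cons "SHAMPOO" (.node true .nil) (.cons "SOAP" (.node true .nil) (.cons "POWDER" (.node true .nil) (.cons "GRANULES" (.node true .nil) (.cons "SACHET" (.node true .nil) (.cons "TUBE" (.node true .nil) (.cons "PATCH" (.node true .nil) (.cons "AEROSOL" (.node true .nil) (.cons "INHALER" (.node true .nil) (.cons "INHALATION" (.node true .nil) (.cons "NEBULISER" (.node true .nil) (.cons "NEBULIZER" (.node true .nil) (.cons "MOUTHWASH" (.node true .nil) (.cons "RINSE" (.node true .nil) .nil))))))))))))))))))))))))))))))))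

lemma pvSuffixTrie_eq : pvSuffixTrie = pvTrieLit := by
  simp [pvSuffixTrie, pvPhrases, pvTrieInsert, pvCsGet, pvCsSet, pvTrieLit]

-- acceptance of a 1- and a 2-token suffix, read off the trie
def pvEndAt (t : PvTrie) (a : String) : Bool :=
  match pvTrieGet t a with
  | some c => pvTrieEnd c
  | none => false

def pvAcc1 (a : String) : Bool := pvEndAt pvTrieLit a

def pvAcc2 (a b : String) : Bool :=
  match pvTrieGet pvTrieLit a with
  | some c => pvEndAt c b
  | none => false

-- depth bound: every grandchild of the literal trie is a leaf
def pvCsAll (p : PvTrie → Bool) : PvTrieCs → Bool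
  | .nil => true
  | .cons _ t cs => p t && pvCsAll p cs

def pvNoKids : PvTrie → Bool
  | .node _ .nil => true
  | .node _ (.cons _ _ _) => false

def pvKidsNoKids : PvTrie → Bool
  | .node _ cs => pvCsAll pvNoKids cs

def pvTrieKids : PvTrie → PvTrieCs
  | .node _ cs => cs

theorem pvCsGet_all (p : PvTrie → Bool) :
    ∀ (cs : PvTrieCs) (w : String) (t : PvTrie),
      pvCsAll p cs = true → pvCsGet cs w = some t → p t = true
  | .nil, w, t, _, hget => by simp [pvCsGet] at hget
  | .cons w' t' cs, w, t, hall, hget => by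
    simp only [pvCsAll, Bool.and_eq_true] at hall
    simp only [pvCsGet] at hget
    by_cases h : (w == w') = true
    · rw [if_pos h] at hget; cases hget; exact hall.1
    · rw [if_neg h] at hget; exact pvCsGet_all p cs w t hall.2 hget

lemma pvDepth_bound : pvCsAll pvKidsNoKids (pvTrieKids pvTrieLit) = true := by decide

lemma pvWalk_noKids (t : PvTrie) (rest : List String) (d : Nat) (acc : List Nat)
    (h : pvNoKids t = true) : pvWalkB t rest d acc = acc := by
  cases t with
  | node e cs =>
    cases cs with
    | nil =>
      cases rest with
      | nil => rfl
      | cons r rs => simp [pvWalkB, pvTrieGet, pvCsGet]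
    | cons w t' cs' => simp [pvNoKids] at h

lemma pvWalkB_cons_none (nd : PvTrie) (tok : String) (rest : List String) (d : Nat)
    (acc : List Nat) (h : pvTrieGet nd tok = none) : pvWalkB nd (tok :: rest) d acc = acc := by
  simp [pvWalkB, h]

lemma pvWalkB_cons_some (nd : PvTrie) (tok : String) (rest : List String) (d : Nat)
    (acc : List Nat) (nd' : PvTrie) (h : pvTrieGet nd tok = some nd') :
    pvWalkB nd (tok :: rest) d acc =
      pvWalkB nd' rest (d + 1) (if pvTrieEnd nd' then acc ++ [d + 1] else acc) := by
  simp [pvWalkB, h]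

-- one walk over r0 :: r1 :: rest collects exactly the accepting depths 1 and 2
lemma pvWalk_char (r0 r1 : String) (rest : List String) :
    pvWalkB pvTrieLit (r0 :: r1 :: rest) 0 [] =
      (if pvAcc1 r0 then [1] else []) ++ (if pvAcc2 r0 r1 then [2] else []) := by
  cases hc : pvTrieGet pvTrieLit r0 with
  | none => rw [pvWalkB_cons_none _ _ _ _ _ hc]; simp [pvAcc1, pvAcc2, pvEndAt, hc]
  | some c =>
    rw [pvWalkB_cons_some _ _ _ _ _ _ hc]
    have hck : pvKidsNoKids c = true := by
      rcases hL : pvTrieLit with ⟨e, cs⟩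
      rw [hL] at hc
      simp only [pvTrieGet] at hc
      have hkids : pvTrieKids pvTrieLit = cs := by rw [hL]; rfl
      exact pvCsGet_all pvKidsNoKids cs r0 c (hkids ▸ pvDepth_bound) hc
    cases hc2 : pvTrieGet c r1 with
    | none =>
      rw [pvWalkB_cons_none _ _ _ _ _ hc2]
      cases hE : pvTrieEnd c <;> simp [pvAcc1, pvAcc2, pvEndAt, hc, hc2, hE]
    | some c2 =>
      rw [pvWalkB_cons_some _ _ _ _ _ _ hc2]
      have hnk : pvNoKids c2 = true := by
        rcases hC : c with ⟨e2, cs2⟩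
        rw [hC] at hc2
        simp only [pvTrieGet] at hc2
        have hall : pvCsAll pvNoKids cs2 = true := by
          have := hck; rw [hC] at this; simpa [pvKidsNoKids] using this
        exact pvCsGet_all pvNoKids cs2 r1 c2 hall hc2
      rw [pvWalk_noKids _ _ _ _ hnk]
      cases hE1 : pvTrieEnd c <;> cases hE2 : pvTrieEnd c2 <;>
        simp [pvAcc1, pvAcc2, pvEndAt, hc, hc2, hE1, hE2]

lemma pvTryB_append (s : String) (toks : List String) (l₁ l₂ : List Nat) :
    pvTryB s toks (l₁ ++ l₂) = (pvTryB s toks l₁).or (pvTryB s toks l₂) := by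
  induction l₁ with
  | nil => simp [pvTryB]
  | cons n rest ih =>
    simp only [List.cons_append, pvTryB]
    split_ifs <;> simp [ih]

-- trie acceptance ↔ membership in the length buckets of A's sorted list
def pvCsKeys : PvTrieCs → List String
  | .nil => []
  | .cons w _ cs => w :: pvCsKeys cs

def pvEndKeys : PvTrieCs → List String
  | .nil => []
  | .cons w t cs => (if pvTrieEnd t then [w] else []) ++ pvEndKeys cs

def pvEndKeys2 : PvTrieCs → List (String × String)
  | .nil => []
  | .cons w t cs => (pvEndKeys (pvTrieKids t)).map (fun b => (w, b)) ++ pvEndKeys2 cs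

theorem pvEndKeys_sub : ∀ (cs : PvTrieCs) (a : String), a ∈ pvEndKeys cs → a ∈ pvCsKeys cs
  | .nil, a, h => by simp [pvEndKeys] at h
  | .cons w t cs, a, h => by
    simp only [pvEndKeys, List.mem_append] at h
    rcases h with h | h
    · rcases hE : pvTrieEnd t with _ | _ <;> rw [hE] at h <;> simp at h
      simp [pvCsKeys, h]
    · simp [pvCsKeys, pvEndKeys_sub cs a h]

theorem pvEndKeys2_sub : ∀ (cs : PvTrieCs) (a b : String), (a, b) ∈ pvEndKeys2 cs → a ∈ pvCsKeys cs
  | .nil, a, b, h => by simp [pvEndKeys2] at h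
  | .cons w t cs, a, b, h => by
    simp only [pvEndKeys2, List.mem_append, List.mem_map] at h
    rcases h with ⟨x, _, hx⟩ | h
    · cases hx; simp [pvCsKeys]
    · simp [pvCsKeys, pvEndKeys2_sub cs a b h]

theorem pvEndKeys_spec : ∀ (cs : PvTrieCs) (a : String), (pvCsKeys cs).Nodup →
    ((match pvCsGet cs a with | some c => pvTrieEnd c | none => false) = true ↔ a ∈ pvEndKeys cs)
  | .nil, a, _ => by simp [pvCsGet, pvEndKeys]
  | .cons w t cs, a, hnd => by
    have hnd' : (pvCsKeys cs).Nodup := by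
      simpa [pvCsKeys] using hnd.of_cons
    by_cases h : a = w
    · subst h
      simp only [pvCsGet, beq_self_eq_true, if_pos, pvEndKeys, List.mem_append]
      cases hE : pvTrieEnd t with
      | true => simp
      | false =>
        simp only [Bool.false_eq_true, false_iff]
        intro hmem
        rcases hmem with hmem | hmem
        · simp at hmem
        · have := pvEndKeys_sub cs a hmem
          simp [pvCsKeys] at hnd
          exact hnd.1 this
    · have hb : (a == w) = false := by simp [h]
      simp only [pvCsGet, hb, Bool.false_eq_true, if_false, pvEndKeys, List.mem_append]
      rw [pvEndKeys_spec cs a hnd']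
      constructor
      · intro hm; exact Or.inr hm
      · rintro (hm | hm)
        · exfalso; rcases hE : pvTrieEnd t with _ | _ <;> rw [hE] at hm <;> simp at hm
          exact h hm
        · exact hm

def pvKidKeysNodup (t : PvTrie) : Bool := decide (pvCsKeys (pvTrieKids t)).Nodup

theorem pvEndKeys2_spec : ∀ (cs : PvTrieCs) (a b : String), (pvCsKeys cs).Nodup →
    pvCsAll pvKidKeysNodup cs = true →
    ((match pvCsGet cs a with | some c => pvEndAt c b | none => false) = true ↔ (a, b) ∈ pvEndKeys2 cs)
  | .nil, a, b, _, _ => by simp [pvCsGet, pvEndKeys2]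
  | .cons w t cs, a, b, hnd, hkn => by
    have hnd' : (pvCsKeys cs).Nodup := by
      simpa [pvCsKeys] using hnd.of_cons
    simp only [pvCsAll, Bool.and_eq_true] at hkn
    by_cases h : a = w
    · subst h
      simp only [pvCsGet, beq_self_eq_true, if_pos, pvEndKeys2, List.mem_append, List.mem_map]
      have hch : pvEndAt t b = true ↔ b ∈ pvEndKeys (pvTrieKids t) := by
        rcases t with ⟨e, cs2⟩
        have hnd2 : (pvCsKeys cs2).Nodup := by
          have := hkn.1
          simp only [pvKidKeysNodup, pvTrieKids, decide_eq_true_eq] at this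
          exact this
        simpa [pvEndAt, pvTrieGet, pvTrieKids] using pvEndKeys_spec cs2 b hnd2
      rw [hch]
      constructor
      · intro hm; exact Or.inl ⟨b, hm, rfl⟩
      · rintro (⟨x, hx, hxe⟩ | hm)
        · cases hxe; exact hx
        · exfalso
          have := pvEndKeys2_sub cs a b hm
          simp [pvCsKeys] at hnd
          exact hnd.1 this
    · have hb : (a == w) = false := by simp [h]
      simp only [pvCsGet, hb, Bool.false_eq_true, if_false, pvEndKeys2, List.mem_append, List.mem_map]
      rw [pvEndKeys2_spec cs a b hnd' hkn.2]
      constructor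
      · intro hm; exact Or.inr hm
      · rintro (⟨x, _, hxe⟩ | hm)
        · exfalso; exact h (congrArg Prod.fst hxe).symm
        · exact hm

lemma pvEndKeys_lit : pvEndKeys (pvTrieKids pvTrieLit) = ["DROPS", "SPRAY", "SOLUTION", "SUSPENSION", "INJECTION", "TABLET", "CAPSULE", "CREAM", "GEL", "OINTMENT", "LOTION", "SYRUP", "SHAMPOO", "SOAP", "POWDER", "GRANULES", "SACHET", "TUBE", "PATCH", "AEROSOL", "INHALER", "INHALATION", "NEBULISER", "NEBULIZER", "MOUTHWASH", "RINSE"] := by rfl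

lemma pvEndKeys2_lit : pvEndKeys2 (pvTrieKids pvTrieLit) = [("DROPS", "EYE"), ("DROPS", "EAR"), ("DROPS", "ORAL"), ("SPRAY", "NASAL"), ("SOLUTION", "ORAL"), ("SUSPENSION", "ORAL"), ("INJECTION", "INTRAVENOUS"), ("INJECTION", "IV"), ("INJECTION", "IM"), ("SR", "TABLET"), ("SR", "CAPSULE"), ("ER", "TABLET"), ("ER", "CAPSULE"), ("XR", "TABLET"), ("XR", "CAPSULE"), ("CR", "TABLET"), ("CR", "CAPSULE"), ("DR", "TABLET"), ("DR", "CAPSULE")] := by rfl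

lemma pvAcc1_iff (a : String) : pvAcc1 a = true ↔ [a] ∈ pvOneL := by
  have h := pvEndKeys_spec (pvTrieKids pvTrieLit) a (by decide)
  rw [show pvAcc1 a = (match pvCsGet (pvTrieKids pvTrieLit) a with
      | some c => pvTrieEnd c | none => false) from rfl, h, pvEndKeys_lit]
  constructor
  · intro hm
    simp only [List.mem_cons, List.not_mem_nil, or_false] at hm
    rcases hm with rfl|rfl|rfl|rfl|rfl|rfl|rfl|rfl|rfl|rfl|rfl|rfl|rfl|rfl|rfl|rfl|rfl|rfl|rfl|rfl|rfl|rfl|rfl|rfl|rfl|rfl <;> decide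
  · intro hm
    simp only [pvOneL, List.mem_cons, List.not_mem_nil, or_false, List.cons.injEq,
      and_true] at hm
    rcases hm with rfl|rfl|rfl|rfl|rfl|rfl|rfl|rfl|rfl|rfl|rfl|rfl|rfl|rfl|rfl|rfl|rfl|rfl|rfl|rfl|rfl|rfl|rfl|rfl|rfl|rfl <;> decide

lemma pvAcc2_iff (a b : String) : pvAcc2 b a = true ↔ [a, b] ∈ pvTwoL := by
  have h := pvEndKeys2_spec (pvTrieKids pvTrieLit) b a (by decide) (by decide)
  rw [show pvAcc2 b a = (match pvCsGet (pvTrieKids pvTrieLit) b with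
      | some c => pvEndAt c a | none => false) from rfl, h, pvEndKeys2_lit]
  constructor
  · intro hm
    simp only [List.mem_cons, List.not_mem_nil, or_false, Prod.mk.injEq] at hm
    rcases hm with ⟨rfl, rfl⟩|⟨rfl, rfl⟩|⟨rfl, rfl⟩|⟨rfl, rfl⟩|⟨rfl, rfl⟩|⟨rfl, rfl⟩|⟨rfl, rfl⟩|⟨rfl, rfl⟩|⟨rfl, rfl⟩|⟨rfl, rfl⟩|⟨rfl, rfl⟩|⟨rfl, rfl⟩|⟨rfl, rfl⟩|⟨rfl, rfl⟩|⟨rfl, rfl⟩|⟨rfl, rfl⟩|⟨rfl, rfl⟩|⟨rfl, rfl⟩|⟨rfl, rfl⟩ <;> decide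
  · intro hm
    simp only [pvTwoL, List.mem_cons, List.not_mem_nil, or_false, List.cons.injEq,
      and_true] at hm
    rcases hm with ⟨rfl, rfl⟩|⟨rfl, rfl⟩|⟨rfl, rfl⟩|⟨rfl, rfl⟩|⟨rfl, rfl⟩|⟨rfl, rfl⟩|⟨rfl, rfl⟩|⟨rfl, rfl⟩|⟨rfl, rfl⟩|⟨rfl, rfl⟩|⟨rfl, rfl⟩|⟨rfl, rfl⟩|⟨rfl, rfl⟩|⟨rfl, rfl⟩|⟨rfl, rfl⟩|⟨rfl, rfl⟩|⟨rfl, rfl⟩|⟨rfl, rfl⟩|⟨rfl, rfl⟩ <;> decide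

lemma pvDrop_two (toks : List String) (r0 r1 : String) (rest : List String)
    (h : toks.reverse = r0 :: r1 :: rest) :
    toks.drop (toks.length - 2) = [r1, r0] := by
  have : toks = (r0 :: r1 :: rest).reverse := by
    rw [← h, List.reverse_reverse]
  subst this
  simp only [List.reverse_cons, List.length_append, List.length_reverse]
  rw [List.append_assoc]
  rw [List.drop_append_of_le_length (by simp)]
  simp

lemma pvDrop_one (toks : List String) (r0 : String) (rest : List String)
    (h : toks.reverse = r0 :: rest) :
    toks.drop (toks.length - 1) = [r0] := by
  have : toks = (r0 :: rest).reverse := by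
    rw [← h, List.reverse_reverse]
  subst this
  simp only [List.reverse_cons, List.length_append, List.length_reverse]
  rw [List.drop_append_of_le_length (by simp)]
  simp

-- ===== VERDICT (by name: the statement is the Claim_ definition above) =====
theorem strip_dosage_suffix_py_spec : Claim_equal_strip_dosage_suffix_py := by
  intro s _
  unfold Spec_strip_dosage_suffix_py strip_dosage_suffix_py strip_dosage_suffix_py_alt
  set toks := PySem.Str.split₀ s with htoks
  by_cases hlt : toks.length < 2
  · simp [hlt]
  · have h2 : 2 ≤ toks.length := by omega
    rw [if_neg hlt, if_neg hlt]
    -- split toks.reverse into its first two tokens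
    obtain ⟨r0, tl, hr⟩ : ∃ r0 tl, toks.reverse = r0 :: tl := by
      cases hrv : toks.reverse with
      | nil =>
        exfalso
        have hL := congrArg List.length hrv
        rw [List.length_reverse] at hL
        simp only [List.length_nil] at hL
        omega
      | cons a l => exact ⟨a, l, rfl⟩
    obtain ⟨r1, rest, htl⟩ : ∃ r1 rest, tl = r1 :: rest := by
      cases htl : tl with
      | nil =>
        exfalso
        have hL := congrArg List.length hr
        rw [htl, List.length_reverse] at hL
        simp only [List.length_cons, List.length_nil] at hL
        omega
      | cons a l => exact ⟨a, l, rfl⟩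
    rw [htl] at hr
    -- A's side: sorted list = 2-word bucket ++ 1-word bucket
    rw [pvSorted_eq, pvTryA_append,
        pvTryA_uniform s toks 2 pvTwoL (by decide) h2,
        pvTryA_uniform s toks 1 pvOneL (by decide) (le_trans one_le_two h2)]
    -- B's side: the walk collects exactly the accepting depths
    rw [pvSuffixTrie_eq, hr, pvWalk_char]
    have e2 : PySem.List.slice toks (some (-((2 : Nat) : Int))) none = [r1, r0] := by
      rw [pvSlice_drop toks 2 (by omega) h2, pvDrop_two toks r0 r1 rest hr]
    have e1 : PySem.List.slice toks (some (-((1 : Nat) : Int))) none = [r0] := by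
      rw [pvSlice_drop toks 1 (by omega) (by omega), pvDrop_one toks r0 (r1 :: rest) hr]
    have m2 : (PySem.List.slice toks (some (-((2 : Nat) : Int))) none ∈ pvTwoL) ↔
        (pvAcc2 r0 r1 = true) := by
      rw [e2]; exact (pvAcc2_iff r1 r0).symm
    have m1 : (PySem.List.slice toks (some (-((1 : Nat) : Int))) none ∈ pvOneL) ↔
        (pvAcc1 r0 = true) := by
      rw [e1]; exact (pvAcc1_iff r0).symm
    rw [if_congr m2 rfl rfl, if_congr m1 rfl rfl]
    cases ha1 : pvAcc1 r0 <;> cases ha2 : pvAcc2 r0 r1 <;>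
      simp only [Bool.false_eq_true, if_true, if_false,
        List.reverse_append, List.reverse_cons, List.reverse_nil, List.nil_append,
        List.append_nil, pvTryB_append, pvTryB, Option.or_none, Option.none_or] <;>
      try (split_ifs <;> simp [Option.or])
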